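-- pv_equiv track=rewrite | github.com/edlabao/cs-practice | hackerrank/python/Algorithms/02_Implementation/08_MigratoryBirds/solution.py | solve
-- ===== SOURCE A (Python) =====
-- def solve(n, ar):
--
--     # Initialize an answer list which will contain a list of all type numbers
--     # that occur maxNum times. This is a list since more than one type can have
--     # maxNum occurrences.
--     answer = []
--
--     # Keep track of the current maximum number of occurrences of any type.
--     maxNum = 0
--
--     # Dict with type numbers as keys and their occurrence count as values.
--     types = {}
--
--     # Iterate thru the array and record types and their number of occurrences.
--     for type in ar:
--         if type not in types:
--             types[type] = 0
--         types[type] += 1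
--         if types[type] > maxNum:
--             maxNum = types[type]
--
--     # We now know what the maximum number of occurrences is, so iterate thru the
--     # array one more time to get the type(s) that occur maxNum times.
--     for type in ar:
--         if types[type] == maxNum:
--             answer.append(type)
--
--     # Return the type with the lowest value in the answer.
--     return min(answer)
-- ===== SOURCE B (Python) =====
-- def solve(n, ar):
--     # Sort the array so that equal types form contiguous runs, then scan the
--     # runs once: the first (hence smallest-valued) run of strictly greatest
--     # length wins.
--     s = sorted(ar)
--     best_val = s[0]
--     best_len = 0
--     i = 0
--     while i < len(s):
--         j = i + 1
--         while j < len(s) and s[j] == s[i]: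
--             j += 1
--         if j - i > best_len:
--             best_len = j - i
--             best_val = s[i]
--         i = j
--     return best_val
-- ===== Notes on version B (the rewrite author's own statement) =====
-- stated objective: alternative
-- what changed: B replaces A's frequency dict, running max and second pass over the array by sort-then-scan: it sorts ar so equal types form contiguous runs and walks the runs once, keeping the first (hence smallest) run of strictly greatest length.
import Mathlib
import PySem

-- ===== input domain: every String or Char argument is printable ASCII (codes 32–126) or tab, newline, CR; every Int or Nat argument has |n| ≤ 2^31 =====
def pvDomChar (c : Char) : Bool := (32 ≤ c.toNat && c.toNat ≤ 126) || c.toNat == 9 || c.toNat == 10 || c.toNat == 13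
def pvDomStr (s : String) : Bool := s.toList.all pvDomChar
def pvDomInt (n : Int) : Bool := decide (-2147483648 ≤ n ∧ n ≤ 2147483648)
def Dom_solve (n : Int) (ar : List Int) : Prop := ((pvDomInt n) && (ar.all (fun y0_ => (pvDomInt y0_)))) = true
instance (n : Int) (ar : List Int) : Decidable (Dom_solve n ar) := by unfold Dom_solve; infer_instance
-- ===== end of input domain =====

-- B sorts the array so equal types form contiguous runs and scans the runs once, keeping the
-- first (smallest) run of strictly greatest length, instead of A's frequency dict with a
-- running max and a second pass over the array (objective: alternative).


-- ===== PORT A =====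
-- one iteration of A's first loop: record the occurrence and update the running max
def stepA (p : PySem.Dict Int Int × Int) (t : Int) : PySem.Dict Int Int × Int :=
  let types0 := if p.1.contains t then p.1 else p.1.insert t (0 : Int)
  let c := types0.getD t 0 + 1
  (types0.insert t c, if c > p.2 then c else p.2)

def solve (n : Int) (ar : List Int) : Int :=
  let st := ar.foldl stepA (PySem.Dict.empty, 0)
  let answer := ar.foldl (fun acc t => if st.1.getD t 0 == st.2 then acc ++ [t] else acc) []
  (PySem.List.min? answer (fun y => y)).getD 0    -- min([]) raises ValueError: excluded by Pre_solve

-- ===== PORT B =====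
-- the inner while loop: length of the run of elements equal to v at the front of the rest
def runLen (v : Int) : List Int → Nat
  | [] => 0
  | x :: xs => if x == v then runLen v xs + 1 else 0

-- the outer while loop over the sorted list: (best_val, best_len) over the runs
def scanRuns : List Int → Int → Int → Int
  | [], bv, _ => bv
  | v :: rest, bv, bl =>
      let k : Int := (runLen v rest : Int) + 1
      if k > bl then scanRuns (rest.drop (runLen v rest)) v k
      else scanRuns (rest.drop (runLen v rest)) bv bl
termination_by s _ _ => s.length
decreasing_by all_goals · simp only [List.length_drop, List.length_cons]; omega

def solve_alt (n : Int) (ar : List Int) : Int :=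
  let s := PySem.List.sorted ar (fun y => y) false
  match s with
  | [] => 0     -- s[0] raises IndexError on empty ar: excluded by Pre_solve
  | v :: _ => scanRuns s v 0

-- ===== PRECONDITION & SPEC =====
-- Pre_ excludes only the empty array, on which both Pythons raise (A: ValueError from min([]);
-- B: IndexError from s[0]).
def Pre_solve (n : Int) (ar : List Int) : Prop := ar ≠ []
instance (n : Int) (ar : List Int) : Decidable (Pre_solve n ar) := by unfold Pre_solve; infer_instance
def pvWitness_solve : Int × List Int := (3, [1, 2, 2])

def Spec_solve (n : Int) (ar : List Int) (out : Int) : Prop := out = solve_alt n ar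
instance (n : Int) (ar : List Int) (out : Int) : Decidable (Spec_solve n ar out) := by unfold Spec_solve; infer_instance

-- ===== CLAIM (what is proved, stated in full; the proofs are below) =====
def Claim_equal_solve : Prop := ∀ (n : Int) (ar : List Int), Dom_solve n ar → Pre_solve n ar → Spec_solve n ar (solve n ar)

-- ===== LEMMAS AND PROOFS =====

-- ---- A-side: the first loop computes Counter(ar) together with the max count ----

def cntStep (d : PySem.Dict Int Int) (t : Int) : PySem.Dict Int Int :=
  d.insert t (d.getD t 0 + 1)

-- the invariant A's first loop maintains: counts are nonnegative, bounded by the running max,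
-- and the running max is 0 or attained at some key
def InvA (d : PySem.Dict Int Int) (m : Int) : Prop :=
  (∀ k, 0 ≤ d.getD k 0) ∧ (∀ k, d.getD k 0 ≤ m) ∧
  (m = 0 ∨ ∃ k, d.contains k = true ∧ d.getD k 0 = m)

theorem stepA_fst (d : PySem.Dict Int Int) (m t : Int) :
    stepA (d, m) t = (cntStep d t, if d.getD t 0 + 1 > m then d.getD t 0 + 1 else m) := by
  unfold stepA cntStep
  by_cases h : d.contains t = true
  · simp [h]
  · simp only [h, Bool.false_eq_true, if_false,
      PySem.Dict.getD_of_not_contains d 0 (by simpa using h),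
      PySem.Dict.getD_insert_self, PySem.Dict.insert_insert_self]

theorem invA_step (d : PySem.Dict Int Int) (m t : Int) (h : InvA d m) :
    InvA (cntStep d t) (if d.getD t 0 + 1 > m then d.getD t 0 + 1 else m) := by
  obtain ⟨h0, hle, hw⟩ := h
  refine ⟨?_, ?_, ?_⟩
  · intro k
    rw [show cntStep d t = d.insert t (d.getD t 0 + 1) from rfl, PySem.Dict.getD_insert]
    have := h0 k; have := h0 t
    split <;> omega
  · intro k
    rw [show cntStep d t = d.insert t (d.getD t 0 + 1) from rfl, PySem.Dict.getD_insert]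
    have := hle k
    split <;> split <;> omega
  · by_cases hc : d.getD t 0 + 1 > m
    · right; refine ⟨t, ?_, ?_⟩
      · exact PySem.Dict.contains_insert_self d t _
      · rw [show cntStep d t = d.insert t (d.getD t 0 + 1) from rfl,
          PySem.Dict.getD_insert_self, if_pos hc]
    · rcases hw with hm0 | ⟨k, hk, hkm⟩
      · exfalso; have := h0 t; omega
      · right; refine ⟨k, ?_, ?_⟩
        · rw [show cntStep d t = d.insert t (d.getD t 0 + 1) from rfl,
            PySem.Dict.contains_insert]
          simp [hk]
        · have hkt : k ≠ t := by intro he; subst he; omega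
          rw [show cntStep d t = d.insert t (d.getD t 0 + 1) from rfl,
            PySem.Dict.getD_insert, if_neg hkt, if_neg hc, hkm]

theorem foldA_eq (l : List Int) : ∀ (d : PySem.Dict Int Int) (m : Int), InvA d m →
    (l.foldl stepA (d, m)).1 = l.foldl cntStep d ∧
    InvA (l.foldl cntStep d) (l.foldl stepA (d, m)).2 := by
  induction l with
  | nil => intro d m h; exact ⟨rfl, h⟩
  | cons t l ih =>
      intro d m h
      simp only [List.foldl_cons, stepA_fst]
      exact ih _ _ (invA_step d m t h)

theorem invA_empty : InvA PySem.Dict.empty 0 := by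
  refine ⟨?_, ?_, Or.inl rfl⟩ <;> intro k <;> simp [PySem.Dict.getD_empty]

-- A's min over the answer list and B's min over the winning run range over the same set of
-- integers, hence agree
theorem min?_id_congr (l1 l2 : List Int) (h : ∀ x, x ∈ l1 ↔ x ∈ l2) :
    PySem.List.min? l1 (fun y => y) = PySem.List.min? l2 (fun y => y) := by
  cases h1 : PySem.List.min? l1 (fun y => y) with
  | none =>
      rw [PySem.List.min?_eq_none_iff] at h1
      subst h1
      cases h2 : PySem.List.min? l2 (fun y => y) with
      | none => rfl
      | some b =>
          have := PySem.List.min?_mem h2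
          rw [← h] at this
          simp at this
  | some a =>
      cases h2 : PySem.List.min? l2 (fun y => y) with
      | none =>
          rw [PySem.List.min?_eq_none_iff] at h2
          subst h2
          have := PySem.List.min?_mem h1
          rw [h] at this
          simp at this
      | some b =>
          have ha := PySem.List.min?_mem h1
          have hb := PySem.List.min?_mem h2
          have h1' := PySem.List.min?_isMin h1 b ((h b).mpr hb)
          have h2' := PySem.List.min?_isMin h2 a ((h a).mp ha)
          simp only [Option.some.injEq]
          omega

-- ---- B-side: characterising the run scan over a sorted list ----

-- the maximum count in s, floored at b
def MC (s : List Int) (b : Int) : Int := (s.map (fun x => (s.count x : Int))).foldr max b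

theorem le_foldr_max_init (l : List Int) (b : Int) : b ≤ l.foldr max b := by
  induction l with
  | nil => exact le_refl b
  | cons x l ih => exact le_trans ih (le_max_right _ _)

theorem le_foldr_max_mem (l : List Int) (b x : Int) (h : x ∈ l) : x ≤ l.foldr max b := by
  induction l with
  | nil => simp at h
  | cons y l ih =>
      rcases List.mem_cons.mp h with rfl | h
      · exact le_max_left _ _
      · exact le_trans (ih h) (le_max_right _ _)

theorem foldr_max_cases (l : List Int) (b : Int) : l.foldr max b = b ∨ l.foldr max b ∈ l := by
  induction l with
  | nil => exact Or.inl rfl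
  | cons x l ih =>
      simp only [List.foldr_cons]
      rcases le_or_gt x (l.foldr max b) with h | h
      · rw [max_eq_right h]
        rcases ih with h' | h'
        · exact Or.inl h'
        · exact Or.inr (List.mem_cons_of_mem _ h')
      · rw [max_eq_left h.le]
        exact Or.inr (List.mem_cons_self)

theorem MC_init (s : List Int) (b : Int) : b ≤ MC s b := le_foldr_max_init _ _

theorem MC_ub (s : List Int) (b x : Int) (h : x ∈ s) : (s.count x : Int) ≤ MC s b :=
  le_foldr_max_mem _ _ _ (List.mem_map.mpr ⟨x, h, rfl⟩)

theorem MC_cases (s : List Int) (b : Int) :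
    MC s b = b ∨ ∃ x ∈ s, (s.count x : Int) = MC s b := by
  rcases foldr_max_cases (s.map (fun x => (s.count x : Int))) b with h | h
  · exact Or.inl h
  · obtain ⟨x, hx, hxe⟩ := List.mem_map.mp h
    exact Or.inr ⟨x, hx, hxe⟩

-- MC is determined by its three characteristic properties
theorem MC_eq_of (s : List Int) (b c : Int) (h1 : b ≤ c)
    (h2 : ∀ x ∈ s, (s.count x : Int) ≤ c)
    (h3 : c = b ∨ ∃ x ∈ s, (s.count x : Int) = c) : MC s b = c := by
  refine le_antisymm ?_ ?_
  · rcases MC_cases s b with h | ⟨x, hx, hxe⟩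
    · rw [h]; exact h1
    · rw [← hxe]; exact h2 x hx
  · rcases h3 with h3' | ⟨x, hx, hxe⟩
    · rw [h3']; exact MC_init s b
    · rw [← hxe]; exact MC_ub s b x hx

theorem runLen_le (v : Int) (l : List Int) : runLen v l ≤ l.length := by
  induction l with
  | nil => simp [runLen]
  | cons x l ih => by_cases h : x == v <;> simp [runLen, h] <;> omega

theorem take_runLen (v : Int) (l : List Int) : ∀ x ∈ l.take (runLen v l), x = v := by
  induction l with
  | nil => simp [runLen]
  | cons y l ih =>
      by_cases h : y == v
      · simp only [runLen, h, if_true, List.take_succ_cons]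
        intro x hx
        rcases List.mem_cons.mp hx with rfl | hx
        · exact beq_iff_eq.mp h
        · exact ih x hx
      · simp [runLen, h]

theorem drop_runLen_gt (v : Int) (l : List Int) (hp : (v :: l).Pairwise (· ≤ ·)) :
    ∀ x ∈ l.drop (runLen v l), v < x := by
  induction l generalizing v with
  | nil => simp [runLen]
  | cons a t ih =>
      have hva : v ≤ a := (List.pairwise_cons.mp hp).1 a List.mem_cons_self
      by_cases h : a == v
      · have hav : a = v := beq_iff_eq.mp h
        simp only [runLen, h, if_true, List.drop_succ_cons]
        subst hav
        exact ih a (List.pairwise_cons.mp hp).2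
      · have hlt : v < a := lt_of_le_of_ne hva (fun he => h (beq_iff_eq.mpr he.symm))
        simp only [runLen, h]
        intro x hx
        rcases List.mem_cons.mp hx with rfl | hx
        · exact hlt
        · exact lt_of_lt_of_le hlt
            (((List.pairwise_cons.mp (List.pairwise_cons.mp hp).2).1) x hx)

-- count decomposition over v :: rest = v :: take ++ drop
theorem count_cons_split (v : Int) (rest : List Int) (x : Int) :
    ((v :: rest).count x : Int) =
      (if x = v then 1 else 0) + ((rest.take (runLen v rest)).count x : Int)
        + ((rest.drop (runLen v rest)).count x : Int) := by
  have hsplit : rest.count x = (rest.take (runLen v rest)).count x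
      + (rest.drop (runLen v rest)).count x := by
    conv_lhs => rw [← List.take_append_drop (runLen v rest) rest]
    rw [List.count_append]
  rw [List.count_cons, hsplit]
  by_cases h : x = v
  · simp only [h, beq_self_eq_true]
    push_cast
    ring
  · simp only [beq_iff_eq, if_neg h, if_neg (show ¬v = x from fun he => h he.symm)]
    push_cast
    ring

theorem count_drop_eq (v : Int) (rest : List Int)
    (x : Int) (hx : v < x) :
    ((v :: rest).count x : Int) = ((rest.drop (runLen v rest)).count x : Int) := by
  rw [count_cons_split]
  have h1 : (rest.take (runLen v rest)).count x = 0 := by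
    rw [List.count_eq_zero]
    intro hmem
    exact absurd (take_runLen v rest x hmem) (by intro he; subst he; exact lt_irrefl _ hx)
  rw [h1, if_neg (by intro he; subst he; exact lt_irrefl _ hx)]
  simp

theorem count_head_eq (v : Int) (rest : List Int) (hp : (v :: rest).Pairwise (· ≤ ·)) :
    ((v :: rest).count v : Int) = (runLen v rest : Nat) + 1 := by
  rw [count_cons_split, if_pos rfl]
  have h1 : ((rest.take (runLen v rest)).count v : Int) = (runLen v rest : Nat) := by
    rw [List.count_eq_length.mpr (fun x hx => (take_runLen v rest x hx).symm),
      List.length_take, Nat.min_eq_left (runLen_le v rest)]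
  have h2 : (rest.drop (runLen v rest)).count v = 0 := by
    rw [List.count_eq_zero]
    intro hmem
    exact absurd (drop_runLen_gt v rest hp v hmem) (lt_irrefl v)
  rw [h1, h2]
  push_cast
  ring

-- when the maximum count differs from the current run length, the head run contributes
-- nothing to the filter of maximal-count elements
theorem filter_runs_eq (v : Int) (rest : List Int) (hp : (v :: rest).Pairwise (· ≤ ·))
    (c : Int) (hc : c ≠ (runLen v rest : Int) + 1) :
    (v :: rest).filter (fun x => (((v :: rest).count x : Int)) == c) =
      (rest.drop (runLen v rest)).filter
        (fun x => (((rest.drop (runLen v rest)).count x : Int)) == c) := by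
  have hvfail : ((((v :: rest).count v : Int)) == c) = false := by
    rw [count_head_eq v rest hp]
    exact beq_eq_false_iff_ne.mpr (fun he => hc he.symm)
  rw [List.filter_cons_of_neg (by simpa using hvfail)]
  have htake : (rest.take (runLen v rest)).filter
      (fun x => (((v :: rest).count x : Int)) == c) = [] := by
    rw [List.filter_eq_nil_iff]
    intro x hx
    rw [take_runLen v rest x hx, count_head_eq v rest hp]
    simp only [beq_iff_eq]
    exact fun he => hc he.symm
  have hsplit := List.filter_append
    (p := fun x => (((v :: rest).count x : Int)) == c)
    (rest.take (runLen v rest)) (rest.drop (runLen v rest))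
  rw [List.take_append_drop] at hsplit
  rw [hsplit, htake, List.nil_append]
  exact List.filter_congr (fun x hx => by
    rw [count_drop_eq v rest x (drop_runLen_gt v rest hp x hx)])

theorem scanRuns_eq (N : Nat) : ∀ s : List Int, s.length ≤ N → s.Pairwise (· ≤ ·) →
    ∀ bv bl : Int,
    scanRuns s bv bl =
      if MC s bl = bl then bv
      else (PySem.List.min? (s.filter (fun x => (s.count x : Int) == MC s bl))
              (fun y => y)).getD 0 := by
  induction N with
  | zero =>
      intro s hlen _ bv bl
      have hs : s = [] := List.length_eq_zero_iff.mp (Nat.le_zero.mp hlen)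
      subst hs
      rw [scanRuns, if_pos (show MC ([] : List Int) bl = bl from rfl)]
  | succ N ih =>
      intro s hlen hp bv bl
      match s with
      | [] => rw [scanRuns, if_pos (show MC ([] : List Int) bl = bl from rfl)]
      | v :: rest =>
        have hstep : scanRuns (v :: rest) bv bl =
            if ((runLen v rest : Int) + 1 > bl)
            then scanRuns (rest.drop (runLen v rest)) v ((runLen v rest : Int) + 1)
            else scanRuns (rest.drop (runLen v rest)) bv bl := by
          rw [scanRuns]
        have hps' : (rest.drop (runLen v rest)).Pairwise (· ≤ ·) :=
          hp.sublist ((List.drop_sublist _ rest).trans (List.sublist_cons_self v rest))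
        have hlen' : (rest.drop (runLen v rest)).length ≤ N := by
          rw [List.length_drop]
          simp only [List.length_cons] at hlen
          omega
        have hgt : ∀ x ∈ rest.drop (runLen v rest), v < x := drop_runLen_gt v rest hp
        have hcv : ((v :: rest).count v : Int) = (runLen v rest : Int) + 1 :=
          count_head_eq v rest hp
        have hcx : ∀ x ∈ rest.drop (runLen v rest),
            ((v :: rest).count x : Int) = ((rest.drop (runLen v rest)).count x : Int) :=
          fun x hx => count_drop_eq v rest x (hgt x hx)
        have hmem : ∀ x ∈ v :: rest, x = v ∨ x ∈ rest.drop (runLen v rest) := by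
          intro x hx
          rcases List.mem_cons.mp hx with rfl | hx
          · exact Or.inl rfl
          · conv at hx => rw [← List.take_append_drop (runLen v rest) rest]
            rcases List.mem_append.mp hx with hx | hx
            · exact Or.inl (take_runLen v rest x hx)
            · exact Or.inr hx
        have hvle : ∀ y ∈ v :: rest, v ≤ y := by
          intro y hy
          rcases List.mem_cons.mp hy with rfl | hy
          · exact le_refl y
          · exact (List.pairwise_cons.mp hp).1 y hy
        by_cases hcase : (runLen v rest : Int) + 1 > bl
        · rw [hstep, if_pos hcase, ih _ hlen' hps' v ((runLen v rest : Int) + 1)]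
          by_cases h1 : MC (rest.drop (runLen v rest)) ((runLen v rest : Int) + 1)
              = (runLen v rest : Int) + 1
          · rw [if_pos h1]
            have hMC : MC (v :: rest) bl = (runLen v rest : Int) + 1 := by
              refine MC_eq_of _ _ _ (le_of_lt hcase) ?_
                (Or.inr ⟨v, List.mem_cons_self, hcv⟩)
              intro x hx
              rcases hmem x hx with rfl | hx'
              · rw [hcv]
              · rw [hcx x hx']
                calc ((rest.drop (runLen v rest)).count x : Int)
                    ≤ MC (rest.drop (runLen v rest)) ((runLen v rest : Int) + 1) :=
                      MC_ub _ _ x hx'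
                  _ = (runLen v rest : Int) + 1 := h1
            rw [hMC, if_neg (by omega : ¬ ((runLen v rest : Int) + 1 = bl))]
            have hvmem : v ∈ (v :: rest).filter
                (fun x => (((v :: rest).count x : Int)) == (runLen v rest : Int) + 1) :=
              List.mem_filter.mpr ⟨List.mem_cons_self, by rw [hcv]; exact beq_self_eq_true _⟩
            cases hmin : PySem.List.min? ((v :: rest).filter
                (fun x => (((v :: rest).count x : Int)) == (runLen v rest : Int) + 1))
                (fun y => y) with
            | none =>
                rw [PySem.List.min?_eq_none_iff] at hmin
                rw [hmin] at hvmem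
                simp at hvmem
            | some m =>
                have hm1 := PySem.List.min?_isMin hmin v hvmem
                have hm2 : v ≤ m :=
                  hvle m (List.mem_of_mem_filter (PySem.List.min?_mem hmin))
                simp only [Option.getD_some]
                omega
          · rw [if_neg h1]
            have hk1 := MC_init (rest.drop (runLen v rest)) ((runLen v rest : Int) + 1)
            have hlt : (runLen v rest : Int) + 1
                < MC (rest.drop (runLen v rest)) ((runLen v rest : Int) + 1) :=
              lt_of_le_of_ne hk1 (Ne.symm h1)
            obtain ⟨x0, hx0, hc0⟩ :=
              (MC_cases (rest.drop (runLen v rest)) ((runLen v rest : Int) + 1)).resolve_left h1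
            have hMC : MC (v :: rest) bl
                = MC (rest.drop (runLen v rest)) ((runLen v rest : Int) + 1) := by
              refine MC_eq_of _ _ _ (le_trans (le_of_lt hcase) hk1) ?_ ?_
              · intro x hx
                rcases hmem x hx with rfl | hx'
                · rw [hcv]; exact le_of_lt hlt
                · rw [hcx x hx']; exact MC_ub _ _ x hx'
              · refine Or.inr ⟨x0, ?_, ?_⟩
                · exact List.mem_cons_of_mem v (List.mem_of_mem_drop hx0)
                · rw [hcx x0 hx0, hc0]
            rw [hMC, if_neg (by omega : ¬ MC (rest.drop (runLen v rest))
                ((runLen v rest : Int) + 1) = bl),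
              filter_runs_eq v rest hp _ (by omega)]
        · rw [hstep, if_neg hcase, ih _ hlen' hps' bv bl]
          have hMC : MC (v :: rest) bl = MC (rest.drop (runLen v rest)) bl := by
            refine MC_eq_of _ _ _ (MC_init _ _) ?_ ?_
            · intro x hx
              rcases hmem x hx with rfl | hx'
              · rw [hcv]; exact le_trans (by omega) (MC_init _ _)
              · rw [hcx x hx']; exact MC_ub _ _ x hx'
            · rcases MC_cases (rest.drop (runLen v rest)) bl with he | ⟨x0, hx0, hc0⟩
              · exact Or.inl he
              · refine Or.inr ⟨x0, List.mem_cons_of_mem v (List.mem_of_mem_drop hx0), ?_⟩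
                rw [hcx x0 hx0, hc0]
          rw [hMC]
          by_cases h2 : MC (rest.drop (runLen v rest)) bl = bl
          · rw [if_pos h2, if_pos h2]
          · have hbl : bl < MC (rest.drop (runLen v rest)) bl :=
              lt_of_le_of_ne (MC_init _ _) (Ne.symm h2)
            rw [if_neg h2, if_neg h2, filter_runs_eq v rest hp _ (by omega)]

-- ===== VERDICT (by name: the statement is the Claim_ definition above) =====
theorem solve_spec : Claim_equal_solve := by
  intro n ar _ hpre
  simp only [Spec_solve, solve, solve_alt]
  have hcnt : ar.foldl cntStep PySem.Dict.empty = PySem.Dict.counter ar :=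
    PySem.Dict.foldl_insert_getD_add_one_eq_counter ar
  obtain ⟨hfst, hinv⟩ := foldA_eq ar PySem.Dict.empty 0 invA_empty
  rw [hcnt] at hfst hinv
  obtain ⟨h0, hle, hw⟩ := hinv
  obtain ⟨a0, ha0⟩ := List.exists_mem_of_ne_nil ar hpre
  have hca : (1 : Int) ≤ (PySem.Dict.counter ar).getD a0 0 := by
    rw [PySem.Dict.getD_counter]; exact_mod_cast List.count_pos_iff.mpr ha0
  have hm1 : (1 : Int) ≤ (ar.foldl stepA (PySem.Dict.empty, 0)).2 := le_trans hca (hle a0)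
  obtain ⟨kk, hk, hkm⟩ := hw.resolve_left (by omega)
  have hkar : kk ∈ ar := by
    have := (PySem.Dict.contains_iff_mem_keys _ kk).mp hk
    rw [PySem.Dict.keys_counter, PySem.Set.mem_ofList] at this
    exact this
  -- A's value is the min over ar's elements of maximal count
  rw [hfst, PySem.List.foldl_append_if_eq_filter
    (fun t => (PySem.Dict.counter ar).getD t 0 == (ar.foldl stepA (PySem.Dict.empty, 0)).2) ar []]
  -- B's value via the run-scan characterisation
  cases hs : PySem.List.sorted ar (fun y => y) false with
  | nil =>
      rw [PySem.List.sorted_eq_nil_iff] at hs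
      contradiction
  | cons v t =>
      have hperm : (v :: t).Perm ar := hs ▸ PySem.List.sorted_perm ar _ false
      have hpw : (v :: t).Pairwise (· ≤ ·) := by
        have := PySem.List.sorted_pairwise ar (fun y => y) (κ := Int)
        rw [hs] at this
        exact this
      have hmatch : (match v :: t with
          | [] => (0 : Int)
          | v' :: _ => scanRuns (v :: t) v' 0) = scanRuns (v :: t) v 0 := rfl
      rw [hmatch, scanRuns_eq (v :: t).length (v :: t) le_rfl hpw v 0]
      have hM : MC (v :: t) 0 = (ar.foldl stepA (PySem.Dict.empty, 0)).2 := by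
        refine MC_eq_of _ _ _ (by omega) ?_ ?_
        · intro x hx
          rw [hperm.count_eq, ← PySem.Dict.getD_counter]
          exact hle x
        · refine Or.inr ⟨kk, hperm.mem_iff.mpr hkar, ?_⟩
          rw [hperm.count_eq, ← PySem.Dict.getD_counter, hkm]
      rw [hM, if_neg (by omega : ¬ (ar.foldl stepA (PySem.Dict.empty, 0)).2 = 0),
        List.nil_append]
      congr 1
      apply min?_id_congr
      intro x
      simp only [List.mem_filter, beq_iff_eq, PySem.Dict.getD_counter, hperm.count_eq,
        hperm.mem_iff]
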